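-- pv_equiv track=rewrite | github.com/lx-0/pixel-realm | scripts/gen_party_assets.py | gen_minimap_party
-- ===== SOURCE A (Python) =====
-- _ = (0, 0, 0, 0)          # transparent
--
-- K   = (13,  13,  13,  255)  # shadow black / outline
--
-- NW  = (240, 240, 240, 255)  # near white
--
-- def blank(w, h, fill=_):
--     return [[fill] * w for _ in range(h)]
--
-- def set_pixel(grid, x, y, color):
--     if 0 <= y < len(grid) and 0 <= x < len(grid[0]):
--         grid[y][x] = color
--
-- def draw_circle_filled(grid, cx, cy, r, color):
--     for dy in range(-r, r + 1):
--         for dx in range(-r, r + 1):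
--             if dx * dx + dy * dy <= r * r:
--                 set_pixel(grid, cx + dx, cy + dy, color)
--
-- def gen_minimap_party(color_inner, color_outer):
--     """8×8 colored dot for party member on minimap."""
--     g = blank(8, 8)
--
--     # Outer ring
--     draw_circle_filled(g, 4, 4, 3, color_outer)
--     # Inner dot
--     draw_circle_filled(g, 4, 4, 2, color_inner)
--     # Highlight
--     set_pixel(g, 3, 3, NW)
--     # Outline
--     for dy in range(-4, 5):
--         for dx in range(-4, 5):
--             dist = dx * dx + dy * dy
--             if 9 <= dist <= 16:
--                 set_pixel(g, 4 + dx, 4 + dy, K)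
--
--     return g
-- ===== SOURCE B (Python) =====
-- _ = (0, 0, 0, 0)
-- K = (13, 13, 13, 255)
-- NW = (240, 240, 240, 255)
--
-- def _pixel(dx, dy, color_inner, color_outer):
--     dist = dx * dx + dy * dy
--     if 9 <= dist <= 16:
--         return K
--     if (dx, dy) == (-1, -1):
--         return NW
--     if dist <= 4:
--         return color_inner
--     if dist <= 8:
--         return color_outer
--     return _
--
-- def gen_minimap_party(color_inner, color_outer):
--     """8x8 colored dot for party member on minimap (single pass, per-pixel priority)."""
--     return [[_pixel(x - 4, y - 4, color_inner, color_outer) for x in range(8)]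
--             for y in range(8)]
-- ===== Notes on version B (the rewrite author's own statement) =====
-- stated objective: simpler
-- what changed: Replaces the layered stamping passes (two filled circles, a highlight set_pixel, then an outline overwrite loop) with a single pass that computes each pixel's final color once via a priority ladder on its squared distance from the center.
import Mathlib
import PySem

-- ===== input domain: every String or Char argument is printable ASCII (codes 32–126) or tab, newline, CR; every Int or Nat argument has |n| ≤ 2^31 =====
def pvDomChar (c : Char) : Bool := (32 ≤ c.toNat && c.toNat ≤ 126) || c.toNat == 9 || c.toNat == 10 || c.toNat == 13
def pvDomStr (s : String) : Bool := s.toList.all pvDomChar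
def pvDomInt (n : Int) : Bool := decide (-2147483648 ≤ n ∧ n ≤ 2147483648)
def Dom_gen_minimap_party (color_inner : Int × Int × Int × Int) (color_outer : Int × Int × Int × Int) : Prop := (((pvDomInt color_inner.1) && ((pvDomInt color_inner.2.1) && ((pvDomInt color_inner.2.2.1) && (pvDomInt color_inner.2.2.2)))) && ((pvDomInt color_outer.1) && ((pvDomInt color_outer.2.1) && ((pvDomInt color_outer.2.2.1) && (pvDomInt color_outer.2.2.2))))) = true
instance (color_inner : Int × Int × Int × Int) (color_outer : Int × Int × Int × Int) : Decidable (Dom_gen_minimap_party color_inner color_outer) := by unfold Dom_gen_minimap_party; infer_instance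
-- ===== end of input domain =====

-- B replaces A's four overlapping stamping passes with a single pass computing each pixel's
-- final color once via a priority ladder (objective: simpler); A mutates its local grid only,
-- so the equivalence is about the return value.

-- ===== PORT A =====
def pvBlank (w h : Nat) (fill : Int × Int × Int × Int) : List (List (Int × Int × Int × Int)) :=
  List.replicate h (List.replicate w fill)

-- set_pixel: guarded functional update (Python mutates in place; port returns the new grid).
-- len(grid[0]) is ported as (g.headD []).length; on this task g is never empty so this is exact.
def pvSetPixel (g : List (List (Int × Int × Int × Int))) (x y : Int)
    (c : Int × Int × Int × Int) : List (List (Int × Int × Int × Int)) :=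
  if 0 ≤ y ∧ y < (g.length : Int) ∧ 0 ≤ x ∧ x < ((g.headD []).length : Int) then
    g.set y.toNat ((g.getD y.toNat []).set x.toNat c)
  else g

def pvDrawCircleFilled (g : List (List (Int × Int × Int × Int))) (cx cy r : Int)
    (c : Int × Int × Int × Int) : List (List (Int × Int × Int × Int)) :=
  (PySem.List.pyRange (-r) (r + 1) 1).foldl (fun g dy =>
    (PySem.List.pyRange (-r) (r + 1) 1).foldl (fun g dx =>
      if dx * dx + dy * dy ≤ r * r then pvSetPixel g (cx + dx) (cy + dy) c else g) g) g

def gen_minimap_party (color_inner : Int × Int × Int × Int) (color_outer : Int × Int × Int × Int) : List (List (Int × Int × Int × Int)) :=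
  let g := pvBlank 8 8 (0, 0, 0, 0)
  let g := pvDrawCircleFilled g 4 4 3 color_outer
  let g := pvDrawCircleFilled g 4 4 2 color_inner
  let g := pvSetPixel g 3 3 (240, 240, 240, 255)
  let g := (PySem.List.pyRange (-4) 5 1).foldl (fun g dy =>
    (PySem.List.pyRange (-4) 5 1).foldl (fun g dx =>
      let dist := dx * dx + dy * dy
      if 9 ≤ dist ∧ dist ≤ 16 then pvSetPixel g (4 + dx) (4 + dy) (13, 13, 13, 255) else g) g) g
  g

-- ===== PORT B =====
def pvPixel (dx dy : Int) (color_inner color_outer : Int × Int × Int × Int) :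
    Int × Int × Int × Int :=
  let dist := dx * dx + dy * dy
  if 9 ≤ dist ∧ dist ≤ 16 then (13, 13, 13, 255)
  else if dx = -1 ∧ dy = -1 then (240, 240, 240, 255)
  else if dist ≤ 4 then color_inner
  else if dist ≤ 8 then color_outer
  else (0, 0, 0, 0)

def gen_minimap_party_alt (color_inner : Int × Int × Int × Int) (color_outer : Int × Int × Int × Int) : List (List (Int × Int × Int × Int)) :=
  (List.range 8).map (fun y =>
    (List.range 8).map (fun x =>
      pvPixel ((x : Int) - 4) ((y : Int) - 4) color_inner color_outer))
-- ===== PRECONDITION & SPEC =====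
def Spec_gen_minimap_party (color_inner : Int × Int × Int × Int) (color_outer : Int × Int × Int × Int) (out : List (List (Int × Int × Int × Int))) : Prop := out = gen_minimap_party_alt color_inner color_outer
instance (color_inner : Int × Int × Int × Int) (color_outer : Int × Int × Int × Int) (out : List (List (Int × Int × Int × Int))) : Decidable (Spec_gen_minimap_party color_inner color_outer out) := by unfold Spec_gen_minimap_party; infer_instance

-- ===== CLAIM (what is proved, stated in full; the proofs are below) =====
def Claim_equal_gen_minimap_party : Prop := ∀ (color_inner : Int × Int × Int × Int) (color_outer : Int × Int × Int × Int), Dom_gen_minimap_party color_inner color_outer → Spec_gen_minimap_party color_inner color_outer (gen_minimap_party color_inner color_outer)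

-- ===== LEMMAS AND PROOFS =====
-- Neither port inspects the color values: we evaluate both on a 5-symbol color alphabet
-- (Fin 5: 0=transparent, 1=inner, 2=outer, 3=K, 4=NW) by `decide`, and transport the result
-- to arbitrary colors through map-commutation lemmas.

def pvSigma (ci co : Int × Int × Int × Int) (i : Fin 5) : Int × Int × Int × Int :=
  if i = 0 then (0, 0, 0, 0)
  else if i = 1 then ci
  else if i = 2 then co
  else if i = 3 then (13, 13, 13, 255)
  else (240, 240, 240, 255)

def gSet (g : List (List (Fin 5))) (x y : Int) (c : Fin 5) : List (List (Fin 5)) :=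
  if 0 ≤ y ∧ y < (g.length : Int) ∧ 0 ≤ x ∧ x < ((g.headD []).length : Int) then
    g.set y.toNat ((g.getD y.toNat []).set x.toNat c)
  else g

def gCircle (g : List (List (Fin 5))) (cx cy r : Int) (c : Fin 5) : List (List (Fin 5)) :=
  (PySem.List.pyRange (-r) (r + 1) 1).foldl (fun g dy =>
    (PySem.List.pyRange (-r) (r + 1) 1).foldl (fun g dx =>
      if dx * dx + dy * dy ≤ r * r then gSet g (cx + dx) (cy + dy) c else g) g) g

def genG : List (List (Fin 5)) :=
  let g := List.replicate 8 (List.replicate 8 (0 : Fin 5))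
  let g := gCircle g 4 4 3 2
  let g := gCircle g 4 4 2 1
  let g := gSet g 3 3 4
  let g := (PySem.List.pyRange (-4) 5 1).foldl (fun g dy =>
    (PySem.List.pyRange (-4) 5 1).foldl (fun g dx =>
      let dist := dx * dx + dy * dy
      if 9 ≤ dist ∧ dist ≤ 16 then gSet g (4 + dx) (4 + dy) 3 else g) g) g
  g

def gPixel (dx dy : Int) : Fin 5 :=
  let dist := dx * dx + dy * dy
  if 9 ≤ dist ∧ dist ≤ 16 then 3
  else if dx = -1 ∧ dy = -1 then 4
  else if dist ≤ 4 then 1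
  else if dist ≤ 8 then 2
  else 0

def altG : List (List (Fin 5)) :=
  (List.range 8).map (fun y => (List.range 8).map (fun x => gPixel ((x : Int) - 4) ((y : Int) - 4)))

theorem pv_headD_map_len (σ : Fin 5 → Int × Int × Int × Int) (g : List (List (Fin 5))) :
    ((g.map (List.map σ)).headD []).length = (g.headD []).length := by
  cases g <;> simp

theorem pv_getD_map (σ : Fin 5 → Int × Int × Int × Int) (g : List (List (Fin 5))) (i : Nat) :
    (g.map (List.map σ)).getD i [] = (g.getD i []).map σ := by
  simp only [List.getD, List.getElem?_map]
  cases g[i]? <;> simp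

theorem pv_set_comm (σ : Fin 5 → Int × Int × Int × Int) (g : List (List (Fin 5)))
    (x y : Int) (v : Int × Int × Int × Int) (c : Fin 5) (h : v = σ c) :
    pvSetPixel (g.map (List.map σ)) x y v = (gSet g x y c).map (List.map σ) := by
  subst h
  unfold pvSetPixel gSet
  simp only [List.length_map, pv_headD_map_len]
  split_ifs with hc
  · rw [pv_getD_map, ← List.map_set, ← List.map_set]
  · rfl

theorem pv_dfold_comm (σ : Fin 5 → Int × Int × Int × Int) (P : Int → Int → Prop)
    [inst : ∀ a b, Decidable (P a b)] (cx cy : Int) (v : Int × Int × Int × Int) (c : Fin 5)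
    (h : v = σ c) (l2 l1 : List Int) : ∀ (g : List (List (Fin 5))),
    List.foldl (fun g2 dy => List.foldl (fun g3 dx =>
        if P dx dy then pvSetPixel g3 (cx + dx) (cy + dy) v else g3) g2 l2)
      (g.map (List.map σ)) l1
    = (List.foldl (fun g2 dy => List.foldl (fun g3 dx =>
        if P dx dy then gSet g3 (cx + dx) (cy + dy) c else g3) g2 l2) g l1).map (List.map σ) := by
  have inner : ∀ (dy : Int) (l : List Int) (g : List (List (Fin 5))),
      List.foldl (fun g3 dx => if P dx dy then pvSetPixel g3 (cx + dx) (cy + dy) v else g3)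
        (g.map (List.map σ)) l
      = (List.foldl (fun g3 dx => if P dx dy then gSet g3 (cx + dx) (cy + dy) c else g3) g l).map
          (List.map σ) := by
    intro dy l
    induction l with
    | nil => intro g; rfl
    | cons a t ih =>
        intro g
        simp only [List.foldl_cons]
        split_ifs with hp
        · rw [pv_set_comm σ g _ _ v c h]; exact ih _
        · exact ih _
  induction l1 with
  | nil => intro g; rfl
  | cons a t ih =>
      intro g
      simp only [List.foldl_cons]
      rw [inner a l2 g]
      exact ih _

theorem pv_circle_comm (σ : Fin 5 → Int × Int × Int × Int) (g : List (List (Fin 5)))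
    (cx cy r : Int) (v : Int × Int × Int × Int) (c : Fin 5) (h : v = σ c) :
    pvDrawCircleFilled (g.map (List.map σ)) cx cy r v = (gCircle g cx cy r c).map (List.map σ) := by
  unfold pvDrawCircleFilled gCircle
  exact pv_dfold_comm σ (fun dx dy => dx * dx + dy * dy ≤ r * r) cx cy v c h _ _ g

theorem pv_blank_comm (ci co : Int × Int × Int × Int) :
    pvBlank 8 8 (0, 0, 0, 0)
      = (List.replicate 8 (List.replicate 8 (0 : Fin 5))).map (List.map (pvSigma ci co)) := by
  simp [pvBlank, pvSigma]

theorem pv_A_eq (ci co : Int × Int × Int × Int) :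
    gen_minimap_party ci co = genG.map (List.map (pvSigma ci co)) := by
  simp only [gen_minimap_party, genG]
  rw [pv_blank_comm ci co,
      pv_circle_comm (pvSigma ci co) _ 4 4 3 co 2 rfl,
      pv_circle_comm (pvSigma ci co) _ 4 4 2 ci 1 rfl,
      pv_set_comm (pvSigma ci co) _ 3 3 (240, 240, 240, 255) 4 rfl,
      pv_dfold_comm (pvSigma ci co) (fun dx dy => 9 ≤ dx * dx + dy * dy ∧ dx * dx + dy * dy ≤ 16)
        4 4 (13, 13, 13, 255) 3 rfl]

theorem pv_pixel_comm (ci co : Int × Int × Int × Int) (dx dy : Int) :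
    pvPixel dx dy ci co = pvSigma ci co (gPixel dx dy) := by
  simp only [pvPixel, gPixel]
  split_ifs <;> rfl

theorem pv_B_eq (ci co : Int × Int × Int × Int) :
    gen_minimap_party_alt ci co = altG.map (List.map (pvSigma ci co)) := by
  unfold gen_minimap_party_alt altG
  simp [List.map_map, Function.comp, pv_pixel_comm]

set_option maxRecDepth 20000 in
theorem pv_genG_eq_altG : genG = altG := by decide

-- ===== VERDICT (by name: the statement is the Claim_ definition above) =====
theorem gen_minimap_party_spec : Claim_equal_gen_minimap_party := by
  intro ci co _
  unfold Spec_gen_minimap_party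
  rw [pv_A_eq, pv_B_eq, pv_genG_eq_altG]
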